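-- pv_equiv track=rewrite | github.com/jojohn01/kan | vskraken.py | __three_minute_list
-- ===== SOURCE A (Python) =====
-- def __three_minute_list(one_minute_list):
--     #Converts a one minute list to a three minute list
--     three_min_list = []
--     for i in range(len(one_minute_list)//3):
--         y = i*3
--         z = y + 2
--         entry = [one_minute_list[y][0], one_minute_list[y][1], one_minute_list[z][2]]
--         three_min_list.append(entry)
--     return three_min_list
-- ===== SOURCE B (Python) =====
-- def __three_minute_list(one_minute_list):
--     # Chunk the rows three at a time with a shared iterator; each group
--     # contributes [open, low-ish, close] = [a[0], a[1], c[2]].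
--     it = iter(one_minute_list)
--     return [[a[0], a[1], c[2]] for a, _b, c in zip(it, it, it)]
-- ===== Notes on version B (the rewrite author's own statement) =====
-- stated objective: idiomatic
-- what changed: Replaces the index-arithmetic loop over range(len//3) (computing y=i*3, z=y+2 and indexing the list) with chunked iteration: zip of one shared iterator three ways yields each group (a,_,c) directly, no indices at all.
-- outside the precondition, e.g. on __three_minute_list([[1, 2], [3], [4]]): A raises IndexError, B raises IndexError
import Mathlib
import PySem

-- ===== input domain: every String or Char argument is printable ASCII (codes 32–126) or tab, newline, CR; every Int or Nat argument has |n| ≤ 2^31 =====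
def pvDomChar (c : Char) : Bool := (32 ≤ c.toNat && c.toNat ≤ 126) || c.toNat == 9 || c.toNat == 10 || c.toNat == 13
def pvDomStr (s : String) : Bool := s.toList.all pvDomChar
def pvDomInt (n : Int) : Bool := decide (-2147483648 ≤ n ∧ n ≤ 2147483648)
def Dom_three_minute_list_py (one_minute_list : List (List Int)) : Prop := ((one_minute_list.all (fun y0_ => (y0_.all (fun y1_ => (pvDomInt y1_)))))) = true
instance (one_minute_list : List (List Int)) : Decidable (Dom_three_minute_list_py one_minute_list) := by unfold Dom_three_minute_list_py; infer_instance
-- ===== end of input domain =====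

-- B replaces A's index arithmetic (i*3, i*3+2 over range(len//3)) with chunked
-- iteration over the rows three at a time (more idiomatic; same cost).

-- ===== PORT A =====
-- for i in range(len//3): append [l[i*3][0], l[i*3][1], l[i*3+2][2]]
-- (row/element access via getD; inside Pre_ every access is in range, so exact)
def three_minute_list_py (one_minute_list : List (List Int)) : List (List Int) :=
  (List.range (one_minute_list.length / 3)).foldl
    (fun three_min_list i =>
      let y := i * 3
      let z := y + 2
      let entry := [(one_minute_list.getD y []).getD 0 0,
                    (one_minute_list.getD y []).getD 1 0,
                    (one_minute_list.getD z []).getD 2 0]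
      three_min_list ++ [entry]) []

-- ===== PORT B =====
-- zip(it, it, it): consume the rows in chunks of three, emit [a[0], a[1], c[2]]
def three_minute_list_py_alt (one_minute_list : List (List Int)) : List (List Int) :=
  match one_minute_list with
  | a :: _b :: c :: rest =>
      [a.getD 0 0, a.getD 1 0, c.getD 2 0] :: three_minute_list_py_alt rest
  | _ => []

-- ===== PRECONDITION & SPEC =====
-- Pre_: exactly the inputs on which the Python raises no IndexError — every row
-- read at position 0/1 has ≥ 2 elements and every row read at position 2 has ≥ 3.
def Pre_three_minute_list_py (one_minute_list : List (List Int)) : Prop :=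
  ∀ i : Nat, i < one_minute_list.length / 3 →
    2 ≤ (one_minute_list.getD (i * 3) []).length ∧
    3 ≤ (one_minute_list.getD (i * 3 + 2) []).length

instance (one_minute_list : List (List Int)) : Decidable (Pre_three_minute_list_py one_minute_list) := by
  unfold Pre_three_minute_list_py; infer_instance

def pvWitness_three_minute_list_py : List (List Int) := [[1, 2, 3], [4, 5, 6], [7, 8, 9], [10]]

def Spec_three_minute_list_py (one_minute_list : List (List Int)) (out : List (List Int)) : Prop := out = three_minute_list_py_alt one_minute_list
instance (one_minute_list : List (List Int)) (out : List (List Int)) : Decidable (Spec_three_minute_list_py one_minute_list out) := by unfold Spec_three_minute_list_py; infer_instance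

-- ===== CLAIM (what is proved, stated in full; the proofs are below) =====
def Claim_equal_three_minute_list_py : Prop := ∀ (one_minute_list : List (List Int)), Dom_three_minute_list_py one_minute_list → Pre_three_minute_list_py one_minute_list → Spec_three_minute_list_py one_minute_list (three_minute_list_py one_minute_list)

-- ===== LEMMAS AND PROOFS =====

-- A's fold over range equals a map over range.
theorem foldl_range_eq_map (f : Nat → List Int) (n : Nat) :
    (List.range n).foldl (fun s i => s ++ [f i]) [] = (List.range n).map f := by
  induction n with
  | zero => simp
  | succ n ih => simp [List.range_succ, List.foldl_append, ih]


theorem A_eq_B (l : List (List Int)) :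
    three_minute_list_py l = three_minute_list_py_alt l := by
  induction l using three_minute_list_py_alt.induct with
  | case1 a b c rest ih =>
    unfold three_minute_list_py at ih ⊢
    rw [foldl_range_eq_map] at ih ⊢
    have hlen : (a :: b :: c :: rest).length / 3 = rest.length / 3 + 1 := by
      simp [List.length]; omega
    rw [hlen, List.range_succ_eq_map, List.map_cons, List.map_map]
    simp only [three_minute_list_py_alt]
    rw [List.cons_eq_cons]
    refine ⟨by simp [List.getD], ?_⟩
    rw [← ih]
    apply List.map_congr_left
    intro i _
    have e1 : (i + 1) * 3 = i * 3 + 1 + 1 + 1 := by omega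
    simp only [Function.comp, Nat.succ_eq_add_one, e1, List.getD_cons_succ]
  | case2 l h =>
    cases l with
    | nil => simp [three_minute_list_py, three_minute_list_py_alt]
    | cons a t =>
      cases t with
      | nil => simp [three_minute_list_py, three_minute_list_py_alt]
      | cons b t' =>
        cases t' with
        | nil => simp [three_minute_list_py, three_minute_list_py_alt]
        | cons c t'' => exact absurd rfl (h a b c t'')

-- ===== VERDICT (by name: the statement is the Claim_ definition above) =====
theorem three_minute_list_py_spec : Claim_equal_three_minute_list_py := by
  intro l _ _
  unfold Spec_three_minute_list_py
  exact A_eq_B l
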